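-- pv_equiv track=rewrite | github.com/migueangel1228/University | AGRA_0.5/Hw02/algoritmo3.py | algoritmo3
-- ===== SOURCE A (Python) =====
-- def algoritmo3 (A):
--     m = None
--     r = 0
--     j = len(A) - 1
--     while j >= 0:
--         i, ac = 0, 0
--         while i < j:
--             if A[i] <= A[j]:
--                 ac = ac + 1
--             i = i + 1
--         if ac > r:
--             r = ac
--             m = A[j]
--         j = j - 1
--
--     return m
-- ===== SOURCE B (Python) =====
-- def algoritmo3(A):
--     # Forward pass keeping a sorted prefix `s`; the count of earlier elements <= x
--     # is the length of the <=-prefix of `s` (early-exit scan), and x is inserted there.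
--     # Update on `c >= r` while scanning forward == A's strict update scanning backward.
--     s = []
--     best = None
--     r = 0
--     for x in A:
--         c = 0
--         n = len(s)
--         while c < n and s[c] <= x:
--             c += 1
--         if c > 0 and c >= r:
--             best = x
--             r = c
--         s.insert(c, x)
--     return best
-- ===== Notes on version B (the rewrite author's own statement) =====
-- stated objective: faster
-- what changed: Replaces the backward O(n^2) full rescan of each prefix by a single forward pass that maintains a sorted prefix list: the count of earlier elements <= x is the length of the <=-prefix found by an early-exit scan (also the insertion point), with the tie-break flipped to >= so the largest index still wins.
import Mathlib
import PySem

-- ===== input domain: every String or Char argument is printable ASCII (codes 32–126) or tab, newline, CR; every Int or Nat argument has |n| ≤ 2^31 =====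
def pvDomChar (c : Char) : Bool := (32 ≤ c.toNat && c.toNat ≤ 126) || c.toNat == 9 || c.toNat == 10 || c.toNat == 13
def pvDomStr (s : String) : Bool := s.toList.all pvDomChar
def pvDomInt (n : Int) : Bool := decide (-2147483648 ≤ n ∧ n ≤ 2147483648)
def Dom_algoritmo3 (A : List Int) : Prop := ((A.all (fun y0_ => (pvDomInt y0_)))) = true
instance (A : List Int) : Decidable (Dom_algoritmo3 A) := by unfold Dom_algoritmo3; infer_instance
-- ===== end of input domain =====

-- B replaces A's backward full rescan of every prefix by one forward pass over a
-- sorted prefix list (count of earlier ≤ x = length of its ≤-prefix); objective: faster (constant factor).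

-- ===== PORT A =====
-- inner 'while i < j' loop of A; indices i and j are always in range, so getD's default is never used
def acCount (A : List Int) (j : Nat) : Int :=
  (List.range j).foldl (fun ac i => if A.getD i 0 ≤ A.getD j 0 then ac + 1 else ac) 0

def algoritmo3 (A : List Int) : Option Int :=
  -- outer 'while j >= 0' loop, j = len(A)-1 … 0
  ((List.range A.length).reverse.foldl
    (fun st j =>
      let ac := acCount A j
      if ac > st.2 then (some (A.getD j 0), ac) else st)
    ((none : Option Int), (0 : Int))).1

-- ===== PORT B =====
-- Source B's early-exit scan + insertion over the sorted prefix, as one structural recursion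
def insCount (x : Int) : List Int → Int × List Int
  | [] => (0, [x])
  | y :: t =>
    if y ≤ x then
      let p := insCount x t
      (p.1 + 1, y :: p.2)
    else (0, x :: y :: t)

def algoritmo3_alt (A : List Int) : Option Int :=
  (A.foldl
    (fun st x =>
      let p := insCount x st.2.2
      if p.1 > 0 ∧ p.1 ≥ st.2.1 then (some x, p.1, p.2) else (st.1, st.2.1, p.2))
    ((none : Option Int), (0 : Int), ([] : List Int))).1

-- ===== PRECONDITION & SPEC =====
def Spec_algoritmo3 (A : List Int) (out : Option Int) : Prop := out = algoritmo3_alt A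
instance (A : List Int) (out : Option Int) : Decidable (Spec_algoritmo3 A out) := by unfold Spec_algoritmo3; infer_instance

-- ===== CLAIM (what is proved, stated in full; the proofs are below) =====
def Claim_equal_algoritmo3 : Prop := ∀ (A : List Int), Dom_algoritmo3 A → Spec_algoritmo3 A (algoritmo3 A)

-- ===== LEMMAS AND PROOFS =====

-- abstract steps over (value, count) pairs
def stepA (st : Option Int × Int) (p : Int × Int) : Option Int × Int :=
  if p.2 > st.2 then (some p.1, p.2) else st

def stepB (st : Option Int × Int) (p : Int × Int) : Option Int × Int :=
  if p.2 > 0 ∧ p.2 ≥ st.2 then (some p.1, p.2) else st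

-- structural (front-first = smallest index last) form of A's selection
def fA : List (Int × Int) → Option Int × Int
  | [] => (none, 0)
  | p :: ps => stepA (fA ps) p

-- the (value, count-of-earlier-≤) pairs, counts via countP on prefixes
def pairsT (A : List Int) : List (Int × Int) :=
  (List.range A.length).map
    (fun j => (A.getD j 0, (((A.take j).countP (fun y => decide (y ≤ A.getD j 0))) : Int)))

theorem pairsT_nonneg (A : List Int) : ∀ p ∈ pairsT A, 0 ≤ p.2 := by
  intro p hp
  simp only [pairsT, List.mem_map] at hp
  obtain ⟨j, _, rfl⟩ := hp
  exact Int.natCast_nonneg _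

theorem fA_nonneg (ps : List (Int × Int)) (h : ∀ p ∈ ps, 0 ≤ p.2) : 0 ≤ (fA ps).2 := by
  induction ps with
  | nil => simp [fA]
  | cons p t ih =>
    have := ih (fun q hq => h q (List.mem_cons_of_mem _ hq))
    simp only [fA, stepA]
    split <;> [exact le_of_lt (lt_of_le_of_lt this (by assumption)); exact this]

-- A's reversed foldl with an arbitrary init, in terms of fA
theorem foldlA_eq (ps : List (Int × Int)) :
    ∀ init : Option Int × Int, 0 ≤ init.2 →
      List.foldl stepA init ps.reverse =
        if (fA ps).2 > init.2 then fA ps else init := by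
  induction ps with
  | nil =>
    intro init h
    simp only [fA, List.reverse_nil, List.foldl_nil]
    rw [if_neg (by omega)]
  | cons p t ih =>
    intro init h
    have hrev : (p :: t).reverse = t.reverse ++ [p] := by simp
    rw [hrev, List.foldl_append, ih init h]
    simp only [List.foldl_cons, List.foldl_nil, fA, stepA]
    split_ifs <;>
      first
        | rfl
        | omega
        | (simp only [Prod.mk.injEq, true_and, and_true]; first | omega | (constructor <;> first | rfl | omega))

-- B's foldl with an arbitrary init, in terms of fA
theorem foldlB_eq (ps : List (Int × Int)) (h : ∀ p ∈ ps, 0 ≤ p.2) :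
    ∀ (m : Option Int) (r : Int), 0 ≤ r →
      List.foldl stepB (m, r) ps =
        if (fA ps).2 ≥ max r 1 then fA ps else (m, max r (fA ps).2) := by
  induction ps with
  | nil =>
    intro m r hr
    simp only [fA, List.foldl_nil]
    rw [if_neg (by omega)]
    simp only [Prod.mk.injEq, true_and]
    omega
  | cons p t ih =>
    intro m r hr
    have hp : 0 ≤ p.2 := h p List.mem_cons_self
    have ht : ∀ q ∈ t, 0 ≤ q.2 := fun q hq => h q (List.mem_cons_of_mem _ hq)
    have hnn := fA_nonneg t ht
    simp only [List.foldl_cons, stepB, fA, stepA]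
    by_cases hc1 : p.2 > 0
    · by_cases hc2 : p.2 ≥ r
      · rw [if_pos ⟨hc1, hc2⟩, ih ht (some p.1) p.2 hp]
        split_ifs <;>
          first
            | rfl
            | omega
            | (simp only [Prod.mk.injEq, true_and, and_true]; first | omega | (constructor <;> first | rfl | omega))
      · rw [if_neg (fun hcc => hc2 hcc.2), ih ht m r hr]
        split_ifs <;>
          first
            | rfl
            | omega
            | (simp only [Prod.mk.injEq, true_and, and_true]; first | omega | (constructor <;> first | rfl | omega))
    · rw [if_neg (fun hcc => hc1 hcc.1), ih ht m r hr]
      split_ifs <;>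
        first
          | rfl
          | omega
          | (simp only [Prod.mk.injEq, true_and, and_true]; first | omega | (constructor <;> first | rfl | omega))

-- (1) A's inner count loop = countP on the prefix
theorem countFold_eq (A : List Int) (v : Int) :
    ∀ j, j ≤ A.length →
      (List.range j).foldl (fun ac i => if A.getD i 0 ≤ v then ac + 1 else ac) 0
        = (((A.take j).countP (fun y => decide (y ≤ v))) : Int) := by
  intro j
  induction j with
  | zero => simp
  | succ k ih =>
    intro hk
    have hkl : k < A.length := hk
    rw [List.range_succ, List.foldl_append, ih (Nat.le_of_succ_le hk)]
    have htake : A.take (k + 1) = A.take k ++ [A[k]] := by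
      rw [List.take_succ]; simp [List.getElem?_eq_getElem hkl]
    have hg : A.getD k 0 = A[k] := List.getD_eq_getElem A 0 hkl
    rw [htake, List.countP_append]
    simp only [List.foldl_cons, List.foldl_nil, hg, List.countP_cons, List.countP_nil]
    by_cases hle : A[k] ≤ v <;> simp [hle] <;> push_cast <;> ring

-- a generic foldl congruence on members
theorem foldl_congr_mem' {α β : Type} (l : List α) (f g : β → α → β) (i : β)
    (h : ∀ b a, a ∈ l → f b a = g b a) : l.foldl f i = l.foldl g i := by
  induction l generalizing i with
  | nil => rfl
  | cons a t ih =>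
    simp only [List.foldl_cons]
    rw [h i a List.mem_cons_self]
    exact ih _ (fun b a ha => h b a (List.mem_cons_of_mem _ ha))

-- (2) port A as a fold of stepA over the pairs
theorem portA_eq (A : List Int) :
    algoritmo3 A = (List.foldl stepA ((none : Option Int), (0 : Int)) (pairsT A).reverse).1 := by
  unfold algoritmo3
  congr 1
  rw [pairsT, ← List.map_reverse, List.foldl_map]
  apply foldl_congr_mem'
  intro st j hj
  have hj' : j < A.length := List.mem_range.mp (List.mem_reverse.mp hj)
  simp only [stepA, acCount, countFold_eq A (A.getD j 0) j (le_of_lt hj')]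

-- (3) the early-exit scan+insert on a sorted list: count of ≤, permutation, sortedness
theorem insCount_spec (x : Int) : ∀ s : List Int, s.Sorted (· ≤ ·) →
    (insCount x s).1 = ((s.countP (fun y => decide (y ≤ x))) : Int)
    ∧ (insCount x s).2.Perm (x :: s) ∧ (insCount x s).2.Sorted (· ≤ ·) := by
  intro s
  induction s with
  | nil =>
    intro _
    refine ⟨by simp [insCount], by simp [insCount], ?_⟩
    simp only [insCount]
    exact List.sorted_singleton _ x
  | cons y t ih =>
    intro hs
    rw [List.sorted_cons] at hs
    obtain ⟨hy, ht⟩ := hs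
    by_cases hle : y ≤ x
    · obtain ⟨hc, hperm, hsort⟩ := ih ht
      refine ⟨?_, ?_, ?_⟩
      · simp only [insCount, if_pos hle, List.countP_cons, hc]
        simp [hle]
      · simp only [insCount, if_pos hle]
        exact (hperm.cons y).trans (List.Perm.swap x y t)
      · simp only [insCount, if_pos hle]
        rw [List.sorted_cons]
        refine ⟨fun b hb => ?_, hsort⟩
        rcases List.mem_cons.mp (hperm.mem_iff.mp hb) with rfl | hbt
        · exact hle
        · exact hy b hbt
    · have hxy : x < y := not_le.mp hle
      refine ⟨?_, ?_, ?_⟩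
      · have h0 : t.countP (fun y => decide (y ≤ x)) = 0 := by
          rw [List.countP_eq_zero]
          intro b hb
          have := hy b hb
          simp; omega
        simp [insCount, hle, List.countP_cons, h0]
      · simp [insCount, hle]
      · simp only [insCount, if_neg hle]
        rw [List.sorted_cons]
        refine ⟨fun b hb => ?_, by rw [List.sorted_cons]; exact ⟨hy, ht⟩⟩
        rcases List.mem_cons.mp hb with rfl | hbt
        · exact le_of_lt hxy
        · exact le_of_lt (lt_of_lt_of_le hxy (hy b hbt))

-- (4) the pairs list grows by one entry at the right
theorem pairsT_append (A : List Int) (x : Int) :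
    pairsT (A ++ [x]) = pairsT A ++ [(x, ((A.countP (fun y => decide (y ≤ x))) : Int))] := by
  simp only [pairsT, List.length_append, List.length_cons, List.length_nil, Nat.zero_add]
  rw [List.range_succ, List.map_append]
  congr 1
  · apply List.map_congr_left
    intro j hj
    rw [List.mem_range] at hj
    rw [List.getD_append _ _ _ _ hj, List.take_append_of_le_length (le_of_lt hj)]
  · have h1 : (A ++ [x]).getD A.length 0 = x := by
      rw [List.getD_append_right _ _ _ _ (le_refl _)]
      simp
    have h2 : (A ++ [x]).take A.length = A := by
      rw [List.take_append_of_le_length (le_refl _), List.take_length]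
    simp [h1, h2]

-- the fold step of port B, named (definitionally the lambda in algoritmo3_alt)
def bstep (st : Option Int × Int × List Int) (x : Int) : Option Int × Int × List Int :=
  let p := insCount x st.2.2
  if p.1 > 0 ∧ p.1 ≥ st.2.1 then (some x, p.1, p.2) else (st.1, st.2.1, p.2)

theorem alt_eq (A : List Int) :
    algoritmo3_alt A = (A.foldl bstep ((none : Option Int), (0 : Int), ([] : List Int))).1 := rfl

-- (5) invariant of port B's fold: the kept list is the sorted prefix, and (best, r) is fold stepB over the pairs
theorem portB_inv (A : List Int) :
    ((A.foldl bstep ((none : Option Int), (0 : Int), ([] : List Int))).2.2).Perm A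
    ∧ ((A.foldl bstep ((none : Option Int), (0 : Int), ([] : List Int))).2.2).Sorted (· ≤ ·)
    ∧ ((A.foldl bstep ((none : Option Int), (0 : Int), ([] : List Int))).1,
       (A.foldl bstep ((none : Option Int), (0 : Int), ([] : List Int))).2.1)
        = List.foldl stepB ((none : Option Int), (0 : Int)) (pairsT A) := by
  induction A using List.reverseRecOn with
  | nil => refine ⟨by simp, List.sorted_nil, by simp [pairsT]⟩
  | append_singleton A x ih =>
    obtain ⟨hperm, hsort, heq⟩ := ih
    obtain ⟨hc, hip, his⟩ :=
      insCount_spec x ((A.foldl bstep ((none : Option Int), (0 : Int), ([] : List Int))).2.2) hsort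
    have hcnt : (insCount x ((A.foldl bstep ((none : Option Int), (0 : Int), ([] : List Int))).2.2)).1
        = ((A.countP (fun y => decide (y ≤ x))) : Int) := by
      rw [hc, hperm.countP_eq]
    rw [pairsT_append, List.foldl_append, List.foldl_append, ← heq]
    simp only [List.foldl_cons, List.foldl_nil, bstep, stepB, hcnt]
    split_ifs
    · exact ⟨(hip.trans (hperm.cons x)).trans (List.perm_append_singleton x A).symm, his, rfl⟩
    · exact ⟨(hip.trans (hperm.cons x)).trans (List.perm_append_singleton x A).symm, his, rfl⟩

-- ===== VERDICT (by name: the statement is the Claim_ definition above) =====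
theorem algoritmo3_spec : Claim_equal_algoritmo3 := by
  intro A _
  unfold Spec_algoritmo3
  obtain ⟨_, _, heq⟩ := portB_inv A
  have hRHS : (A.foldl bstep ((none : Option Int), (0 : Int), ([] : List Int))).1
      = (List.foldl stepB ((none : Option Int), (0 : Int)) (pairsT A)).1 :=
    congrArg Prod.fst heq
  rw [portA_eq, alt_eq, hRHS,
    foldlA_eq (pairsT A) ((none : Option Int), (0 : Int)) (le_refl 0),
    foldlB_eq (pairsT A) (pairsT_nonneg A) none 0 (le_refl 0)]
  by_cases hgt : (fA (pairsT A)).2 > 0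
  · rw [if_pos hgt, if_pos (by simp; omega)]
  · rw [if_neg hgt, if_neg (by simp; omega)]
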